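-- pv_equiv track=rewrite | github.com/AlexLacour/advent-of-code-monorepo | 2015/scripts/3.py | compute_gifts_map
-- ===== SOURCE A (Python) =====
-- from collections import defaultdict
--
-- move_to_coords_dict = {"^": (0, 1), "v": (0, -1), ">": (1, 0), "<": (-1, 0)}
--
-- def compute_gifts_map(instructions: str, with_robo_santa: bool = False):
--     position = [0, 0]
--     robo_santa_position = [0, 0]
--
--     gifts_map_dict = defaultdict(int)
--
--     gifts_map_dict[tuple(position)] += 1
--     if with_robo_santa:
--         gifts_map_dict[tuple(robo_santa_position)] += 1
--
--     for move_id, move_char in enumerate(instructions):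
--         if with_robo_santa and move_id % 2:
--             position_to_update = robo_santa_position
--         else:
--             position_to_update = position
--
--         x_move, y_move = move_to_coords_dict[move_char]
--
--         position_to_update[0] += x_move
--         position_to_update[1] += y_move
--
--         gifts_map_dict[tuple(position_to_update)] += 1
--     return gifts_map_dict
-- ===== SOURCE B (Python) =====
-- from collections import defaultdict, Counter
--
-- move_to_coords_dict = {"^": (0, 1), "v": (0, -1), ">": (1, 0), "<": (-1, 0)}
--
--
-- def _walk(deltas):
--     """Path from the origin: (0,0) followed by the cumulative sums of deltas."""
--     x = y = 0
--     path = [(0, 0)]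
--     for dx, dy in deltas:
--         x += dx
--         y += dy
--         path.append((x, y))
--     return path
--
--
-- def compute_gifts_map(instructions: str, with_robo_santa: bool = False):
--     deltas = [move_to_coords_dict[c] for c in instructions]
--     if with_robo_santa:
--         santa_path = _walk(deltas[0::2])
--         robo_path = _walk(deltas[1::2])
--         # chronological visit order: both starts, then alternate santa/robo steps
--         visited = [santa_path[0], robo_path[0]]
--         for i in range(max(len(santa_path), len(robo_path)) - 1):
--             if i + 1 < len(santa_path):
--                 visited.append(santa_path[i + 1])
--             if i + 1 < len(robo_path):
--                 visited.append(robo_path[i + 1])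
--     else:
--         visited = _walk(deltas)
--     return defaultdict(int, Counter(visited))
-- ===== Notes on version B (the rewrite author's own statement) =====
-- stated objective: alternative
-- what changed: B replaces A's single fused loop (two mutable positions plus an incrementally updated defaultdict) by a three-phase decomposition: split the instructions by index parity into the two agents' delta streams, compute each agent's path as a prefix-sum walk from (0,0), interleave the paths back into chronological visit order, and count the visited coordinates with collections.Counter.
import Mathlib
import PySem

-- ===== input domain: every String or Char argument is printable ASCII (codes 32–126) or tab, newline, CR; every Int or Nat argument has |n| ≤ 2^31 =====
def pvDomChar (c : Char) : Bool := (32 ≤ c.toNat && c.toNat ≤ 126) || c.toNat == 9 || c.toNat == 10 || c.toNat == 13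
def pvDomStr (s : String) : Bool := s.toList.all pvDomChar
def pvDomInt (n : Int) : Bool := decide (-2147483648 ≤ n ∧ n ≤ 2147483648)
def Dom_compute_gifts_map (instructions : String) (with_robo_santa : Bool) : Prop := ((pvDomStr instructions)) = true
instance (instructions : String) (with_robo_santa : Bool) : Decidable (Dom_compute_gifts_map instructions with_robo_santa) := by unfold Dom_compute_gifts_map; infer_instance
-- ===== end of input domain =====

-- B replaces A's fused walk-and-count loop by parity-splitting the instructions into the two
-- agents' prefix-sum paths, interleaving them chronologically, and counting with Counter
-- (objective: alternative decomposition, same O(n) cost).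


-- ===== PORT A =====
-- module constant move_to_coords_dict
def moveDict : PySem.Dict Char (Int × Int) :=
  PySem.Dict.ofList [('^', (0, 1)), ('v', (0, -1)), ('>', (1, 0)), ('<', (-1, 0))]

-- move_to_coords_dict[c]; the default (0,0) is never reached under Pre_ (Python raises KeyError there)
def moveDelta (c : Char) : Int × Int := (moveDict.get? c).getD (0, 0)

-- one iteration of A's for-loop: state = (position, robo_santa_position, gifts_map_dict)
def stepA (with_robo_santa : Bool) (st : (Int × Int) × (Int × Int) × PySem.Dict (Int × Int) Int)
    (ic : Int × Char) : (Int × Int) × (Int × Int) × PySem.Dict (Int × Int) Int :=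
  let (pos, rpos, d) := st
  let (dx, dy) := moveDelta ic.2
  if with_robo_santa && ic.1 % 2 == 1 then
    let np := (rpos.1 + dx, rpos.2 + dy)
    (pos, np, d.modify np 0 (· + 1))             -- gifts_map_dict[tuple(position_to_update)] += 1
  else
    let np := (pos.1 + dx, pos.2 + dy)
    (np, rpos, d.modify np 0 (· + 1))

def compute_gifts_map (instructions : String) (with_robo_santa : Bool) : List (Int × Int × Int) :=
  let d0 : PySem.Dict (Int × Int) Int := PySem.Dict.empty.modify (0, 0) 0 (· + 1)
  let d0 := if with_robo_santa then d0.modify (0, 0) 0 (· + 1) else d0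
  let st := (PySem.List.enumerate instructions.toList).foldl (stepA with_robo_santa)
              ((0, 0), (0, 0), d0)
  st.2.2.items.map (fun p => (p.1.1, p.1.2, p.2))   -- dict[(x,y)]=c rendered as (x,y,c)

-- ===== PORT B =====
-- _walk's loop body (path built front-to-back, as Source B appends)
def walkAux (ds : List (Int × Int)) (x y : Int) : List (Int × Int) :=
  match ds with
  | [] => []
  | (dx, dy) :: t => (x + dx, y + dy) :: walkAux t (x + dx) (y + dy)

-- _walk deltas: (0,0) followed by cumulative sums
def walk (ds : List (Int × Int)) : List (Int × Int) := (0, 0) :: walkAux ds 0 0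

-- xs[0::2]: exact for step-2 slicing from index 0 (PySem.List.slice covers only step ±1)
def everyOther {α : Type} : List α → List α
  | [] => []
  | [a] => [a]
  | a :: _ :: t => a :: everyOther t

-- Source B's interleaving loop: alternate elements, appending the tail of the longer list
def interleave {α : Type} : List α → List α → List α
  | [], ys => ys
  | x :: xs, ys => x :: interleave ys xs
termination_by xs ys => xs.length + ys.length
decreasing_by simp; omega

def compute_gifts_map_alt (instructions : String) (with_robo_santa : Bool) : List (Int × Int × Int) :=
  let deltas := instructions.toList.map moveDelta
  let visited :=
    if with_robo_santa then
      -- santa_path[0] = robo_path[0] = (0,0) by construction of _walk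
      ((0, 0) : Int × Int) :: (0, 0) ::
        interleave (walkAux (everyOther deltas) 0 0) (walkAux (everyOther (deltas.drop 1)) 0 0)
    else walk deltas
  (PySem.Dict.counter visited).items.map (fun p => (p.1.1, p.1.2, p.2))

-- ===== PRECONDITION & SPEC =====
-- Pre_ excludes exactly the instructions containing a character other than ^ v > <,
-- on which the Python A raises KeyError.
def Pre_compute_gifts_map (instructions : String) (with_robo_santa : Bool) : Prop :=
  (instructions.toList.all (fun c => c == '^' || c == 'v' || c == '>' || c == '<')) = true
instance (instructions : String) (with_robo_santa : Bool) : Decidable (Pre_compute_gifts_map instructions with_robo_santa) := by unfold Pre_compute_gifts_map; infer_instance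

def pvWitness_compute_gifts_map : String × Bool := ("^^v<>v", true)

def Spec_compute_gifts_map (instructions : String) (with_robo_santa : Bool) (out : List (Int × Int × Int)) : Prop := out = compute_gifts_map_alt instructions with_robo_santa
instance (instructions : String) (with_robo_santa : Bool) (out : List (Int × Int × Int)) : Decidable (Spec_compute_gifts_map instructions with_robo_santa out) := by unfold Spec_compute_gifts_map; infer_instance

-- ===== CLAIM (what is proved, stated in full; the proofs are below) =====
def Claim_equal_compute_gifts_map : Prop := ∀ (instructions : String) (with_robo_santa : Bool), Dom_compute_gifts_map instructions with_robo_santa → Pre_compute_gifts_map instructions with_robo_santa → Spec_compute_gifts_map instructions with_robo_santa (compute_gifts_map instructions with_robo_santa)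

-- ===== LEMMAS AND PROOFS =====

-- the chronological sequence of positions visited by A's loop (one per instruction),
-- starting at index k with santa at p and robo at r
def chron (robo : Bool) (k : Int) (p r : Int × Int) : List (Int × Int) → List (Int × Int)
  | [] => []
  | d :: t =>
    if robo && k % 2 == 1 then
      (r.1 + d.1, r.2 + d.2) :: chron robo (k + 1) p (r.1 + d.1, r.2 + d.2) t
    else
      (p.1 + d.1, p.2 + d.2) :: chron robo (k + 1) (p.1 + d.1, p.2 + d.2) r t

lemma foldA_chron (robo : Bool) (cs : List Char) : ∀ (k : Int) (p r : Int × Int)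
    (d : PySem.Dict (Int × Int) Int),
    ((PySem.List.enumerate cs k).foldl (stepA robo) (p, r, d)).2.2 =
      (chron robo k p r (cs.map moveDelta)).foldl (fun d x => d.modify x 0 (· + 1)) d := by
  induction cs with
  | nil => intro k p r d; simp [PySem.List.enumerate_nil, chron]
  | cons c t ih =>
    intro k p r d
    rw [PySem.List.enumerate_cons]
    simp only [List.map_cons, List.foldl_cons, chron, stepA]
    by_cases h : robo && k % 2 == 1
    · simp only [h, ih]
      simp
    · simp only [h]
      simp only [Bool.not_eq_true] at h
      simp [ih]

lemma everyOther_cons {α : Type} (a : α) (t : List α) :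
    everyOther (a :: t) = a :: everyOther (t.drop 1) := by
  cases t <;> simp [everyOther]

-- the chronological visit sequence is the alternating interleaving of the two agents' walks,
-- the agent moving first being the one determined by the parity of the starting index
lemma chron_true (ds : List (Int × Int)) : ∀ (k : Int) (p r : Int × Int),
    chron true k p r ds =
      if k % 2 == 1 then
        interleave (walkAux (everyOther ds) r.1 r.2) (walkAux (everyOther (ds.drop 1)) p.1 p.2)
      else
        interleave (walkAux (everyOther ds) p.1 p.2) (walkAux (everyOther (ds.drop 1)) r.1 r.2) := by
  induction ds with
  | nil => intro k p r; simp [chron, everyOther, walkAux, interleave]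
  | cons d t ih =>
    intro k p r
    by_cases h : k % 2 = 1
    · have h1 : (k + 1) % 2 ≠ 1 := by omega
      simp only [chron, h, beq_iff_eq, ih, everyOther_cons,
        walkAux, List.drop_one, interleave, if_neg h1]
      simp
    · have h1 : (k + 1) % 2 = 1 := by omega
      simp only [chron, beq_iff_eq, h, ih, everyOther_cons,
        walkAux, List.drop_one, interleave, if_pos h1]
      simp [h]

lemma chron_false (ds : List (Int × Int)) : ∀ (k : Int) (p r : Int × Int),
    chron false k p r ds = walkAux ds p.1 p.2 := by
  induction ds with
  | nil => intro k p r; simp [chron, walkAux]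
  | cons d t ih => intro k p r; simp [chron, walkAux, ih]

-- ===== VERDICT (by name: the statement is the Claim_ definition above) =====
theorem compute_gifts_map_spec : Claim_equal_compute_gifts_map := by
  intro instructions robo _ _
  unfold Spec_compute_gifts_map compute_gifts_map compute_gifts_map_alt
  dsimp only
  cases robo with
  | false =>
    rw [foldA_chron]
    simp [chron_false, walk, PySem.Dict.counter_eq_foldl]
  | true =>
    rw [foldA_chron]
    simp [chron_true, PySem.Dict.counter_eq_foldl]
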